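-- pv_equiv track=rewrite | github.com/paineliu/bcc_nlq | make_data.py | get_sample_wildcard
-- ===== SOURCE A (Python) =====
-- def get_sample_wildcard(tokens, a, b):
--     bcc_list = []
--     bcc = []
--     for i, item in enumerate(tokens):
--         if (i == a):
--             bcc.append('.' * len(item[0]))
--         else:
--             bcc.append(item[0])
--     bcc_list.append(' '.join(bcc))
--
--     bcc = []
--     for i, item in enumerate(tokens):
--         if (i == a):
--             bcc.append('.' * len(item[0]) + '/{}'.format(item[1]))
--         else:
--             bcc.append(item[0])
--     bcc_list.append(' '.join(bcc))
--
--     bcc = []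
--     for i, item in enumerate(tokens):
--         if (i == a):
--             bcc.append('.' * len(item[0]) + '/[{} v]'.format(item[1]))
--         else:
--             bcc.append(item[0])
--     bcc_list.append(' '.join(bcc))
--
--     if (a != b):
--         bcc = []
--         for i, item in enumerate(tokens):
--             if (i == b):
--                 bcc.append('.' * len(item[0]) + '/{}'.format(item[1]))
--             else:
--                 bcc.append(item[0])
--         bcc_list.append(' '.join(bcc))
--     return bcc_list
-- ===== SOURCE B (Python) =====
-- def get_sample_wildcard(tokens, a, b):
--     r0, r1, r2, r3 = [], [], [], []
--     for i, (w, tag) in enumerate(tokens):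
--         dots = '.' * len(w)
--         r0.append(dots if i == a else w)
--         r1.append(dots + '/' + tag if i == a else w)
--         r2.append(dots + '/[' + tag + ' v]' if i == a else w)
--         r3.append(dots + '/' + tag if i == b else w)
--     out = [' '.join(r0), ' '.join(r1), ' '.join(r2)]
--     if a != b:
--         out.append(' '.join(r3))
--     return out
-- ===== Notes on version B (the rewrite author's own statement) =====
-- stated objective: alternative
-- what changed: B makes a single fused pass over the tokens, maintaining four row accumulators at once (computing the dot mask once per token), instead of A's four separate enumerate loops each rebuilt from scratch.
import Mathlib
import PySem

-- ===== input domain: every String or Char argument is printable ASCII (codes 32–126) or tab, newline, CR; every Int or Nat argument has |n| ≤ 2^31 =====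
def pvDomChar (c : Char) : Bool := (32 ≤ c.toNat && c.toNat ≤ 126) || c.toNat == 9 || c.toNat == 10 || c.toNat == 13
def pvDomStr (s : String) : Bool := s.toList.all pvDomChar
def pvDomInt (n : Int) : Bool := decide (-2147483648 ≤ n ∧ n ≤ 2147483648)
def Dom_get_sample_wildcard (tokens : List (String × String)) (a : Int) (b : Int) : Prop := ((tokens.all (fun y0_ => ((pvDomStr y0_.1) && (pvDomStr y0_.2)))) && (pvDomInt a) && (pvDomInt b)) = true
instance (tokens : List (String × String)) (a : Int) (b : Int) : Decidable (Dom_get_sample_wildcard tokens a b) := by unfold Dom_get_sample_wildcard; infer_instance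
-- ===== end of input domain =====

-- B replaces A's four separate enumerate loops by ONE fused pass keeping four row
-- accumulators at once (objective: alternative decomposition, same cost).

-- '.' * len(t[0])            (A's replacement strings, transliterated)
def pvMask0 (t : String × String) : String :=
  String.ofList (PySem.List.pyRepeat ['.'] (PySem.Str.len t.1))
-- '.' * len(t[0]) + '/{}'.format(t[1])
def pvMask1 (t : String × String) : String :=
  String.ofList (PySem.List.pyRepeat ['.'] (PySem.Str.len t.1) ++ '/' :: t.2.toList)
-- '.' * len(t[0]) + '/[{} v]'.format(t[1])
def pvMask2 (t : String × String) : String :=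
  String.ofList (PySem.List.pyRepeat ['.'] (PySem.Str.len t.1) ++ '/' :: '[' :: t.2.toList ++ [' ', 'v', ']'])

-- ===== PORT A =====
def get_sample_wildcard (tokens : List (String × String)) (a : Int) (b : Int) : List String :=
  let bcc_list : List String := []
  let bcc := (PySem.List.enumerate tokens).foldl
    (fun bcc p => bcc ++ [if p.1 = a then pvMask0 p.2 else p.2.1]) []
  let bcc_list := bcc_list ++ [PySem.Str.join " " bcc]
  let bcc := (PySem.List.enumerate tokens).foldl
    (fun bcc p => bcc ++ [if p.1 = a then pvMask1 p.2 else p.2.1]) []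
  let bcc_list := bcc_list ++ [PySem.Str.join " " bcc]
  let bcc := (PySem.List.enumerate tokens).foldl
    (fun bcc p => bcc ++ [if p.1 = a then pvMask2 p.2 else p.2.1]) []
  let bcc_list := bcc_list ++ [PySem.Str.join " " bcc]
  if a ≠ b then
    let bcc := (PySem.List.enumerate tokens).foldl
      (fun bcc p => bcc ++ [if p.1 = b then pvMask1 p.2 else p.2.1]) []
    bcc_list ++ [PySem.Str.join " " bcc]
  else
    bcc_list

-- ===== PORT B =====
-- one fused fold over the enumerated tokens, carrying the four rows (r0,r1,r2,r3)
def get_sample_wildcard_alt (tokens : List (String × String)) (a : Int) (b : Int) : List String :=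
  let rows := (PySem.List.enumerate tokens).foldl
    (fun (s : List String × List String × List String × List String) p =>
      let dots := PySem.List.pyRepeat ['.'] (PySem.Str.len p.2.1)
      (s.1 ++ [if p.1 = a then String.ofList dots else p.2.1],
       s.2.1 ++ [if p.1 = a then String.ofList (dots ++ ['/'] ++ p.2.2.toList) else p.2.1],
       s.2.2.1 ++ [if p.1 = a then String.ofList (dots ++ ['/', '['] ++ p.2.2.toList ++ [' ', 'v', ']']) else p.2.1],
       s.2.2.2 ++ [if p.1 = b then String.ofList (dots ++ ['/'] ++ p.2.2.toList) else p.2.1]))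
    ([], [], [], [])
  let out := [PySem.Str.join " " rows.1, PySem.Str.join " " rows.2.1, PySem.Str.join " " rows.2.2.1]
  if a ≠ b then out ++ [PySem.Str.join " " rows.2.2.2] else out

-- ===== PRECONDITION & SPEC =====
def Spec_get_sample_wildcard (tokens : List (String × String)) (a : Int) (b : Int) (out : List String) : Prop := out = get_sample_wildcard_alt tokens a b
instance (tokens : List (String × String)) (a : Int) (b : Int) (out : List String) : Decidable (Spec_get_sample_wildcard tokens a b out) := by unfold Spec_get_sample_wildcard; infer_instance

-- ===== CLAIM (what is proved, stated in full; the proofs are below) =====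
def Claim_equal_get_sample_wildcard : Prop := ∀ (tokens : List (String × String)) (a : Int) (b : Int), Dom_get_sample_wildcard tokens a b → Spec_get_sample_wildcard tokens a b (get_sample_wildcard tokens a b)

-- ===== LEMMAS AND PROOFS =====

-- each of A's append-accumulator loops is a map
theorem pv_foldl_append {α β : Type} (g : α → β) :
    ∀ (l : List α) (acc : List β),
      l.foldl (fun acc x => acc ++ [g x]) acc = acc ++ l.map g := by
  intro l
  induction l with
  | nil => simp
  | cons x xs ih => intro acc; simp [List.foldl, ih]

-- B's fused four-accumulator fold computes the four maps componentwise
theorem pv_foldl4 {α β : Type} (g0 g1 g2 g3 : α → β) :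
    ∀ (l : List α) (s : List β × List β × List β × List β),
      l.foldl (fun s x => (s.1 ++ [g0 x], s.2.1 ++ [g1 x], s.2.2.1 ++ [g2 x], s.2.2.2 ++ [g3 x])) s
        = (s.1 ++ l.map g0, s.2.1 ++ l.map g1, s.2.2.1 ++ l.map g2, s.2.2.2 ++ l.map g3) := by
  intro l
  induction l with
  | nil => simp
  | cons x xs ih => intro s; simp [List.foldl, ih]

-- ===== VERDICT (by name: the statement is the Claim_ definition above) =====
theorem get_sample_wildcard_spec : Claim_equal_get_sample_wildcard := by
  intro tokens a b _
  unfold Spec_get_sample_wildcard get_sample_wildcard get_sample_wildcard_alt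
  simp only [pv_foldl_append, pv_foldl4, List.nil_append]
  simp [pvMask0, pvMask1, pvMask2]
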